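-- pv_equiv track=rewrite | github.com/kh277/BOJ | 백준/Platinum/17400. 깃발춤/깃발춤.py | build
-- ===== SOURCE A (Python) =====
-- def build(N, A):
--     tree = [0] * (2*N)
--     for i in range(len(A)):
--         if i % 2 == 0:
--             tree[i+N] = A[i]
--         else:
--             tree[i+N] = -A[i]
--     for i in range(N-1, 0, -1):
--         tree[i] = tree[i<<1] + tree[i<<1 | 1]
--
--     return tree
-- ===== SOURCE B (Python) =====
-- def build(N, A):
--     if N <= 0:
--         return []
--     tree = [0] * (2 * N)
--     for i in range(len(A)):
--         tree[i + N] = A[i] if i % 2 == 0 else -A[i]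
--
--     def f(i):
--         if i >= N:
--             return tree[i]
--         v = f(2 * i) + f(2 * i + 1)
--         tree[i] = v
--         return v
--
--     f(1)
--     return tree
-- ===== Notes on version B (the rewrite author's own statement) =====
-- stated objective: alternative
-- what changed: The bottom-up iterative internal-node loop (indices N-1 down to 1) is replaced by a recursive post-order build f(1) over the heap-indexed tree, with an explicit empty result for N <= 0 where the recursion has no root.
import Mathlib
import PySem

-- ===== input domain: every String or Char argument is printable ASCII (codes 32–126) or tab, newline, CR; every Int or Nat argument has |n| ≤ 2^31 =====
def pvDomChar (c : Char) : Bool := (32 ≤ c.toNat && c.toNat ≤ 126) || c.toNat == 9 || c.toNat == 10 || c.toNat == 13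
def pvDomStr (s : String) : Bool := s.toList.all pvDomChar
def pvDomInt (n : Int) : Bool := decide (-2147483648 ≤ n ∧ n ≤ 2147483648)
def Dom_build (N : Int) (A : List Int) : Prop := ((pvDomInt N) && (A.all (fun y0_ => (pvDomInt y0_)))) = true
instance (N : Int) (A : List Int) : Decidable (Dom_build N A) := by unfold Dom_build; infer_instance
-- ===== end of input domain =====

-- B replaces A's bottom-up internal-node loop with a recursive post-order build over the heap indices (alternative decomposition, same cost).


-- ===== PORT A =====
-- Literal port of A: tree = [0]*(2*N); leaf loop over range(len(A)); then
-- 'for i in range(N-1, 0, -1): tree[i] = tree[i<<1] + tree[i<<1|1]'.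
-- i<<1 = 2*i and i<<1|1 = 2*i+1 for the positive i this range yields; indices are
-- written as Nat (i + N.toNat, i.toNat) — exact under Pre_build, where N ≥ 0 whenever
-- either loop body runs and every touched index is in range (Python raises otherwise).
def build (N : Int) (A : List Int) : List Int :=
  let tree0 : List Int := List.replicate (2 * N).toNat 0
  let tree1 := (List.range A.length).foldl (fun t i =>
      if i % 2 = 0 then t.set (i + N.toNat) (A.getD i 0)
      else t.set (i + N.toNat) (-(A.getD i 0))) tree0
  (PySem.List.pyRange (N - 1) 0 (-1)).foldl
    (fun t i => t.set i.toNat (t.getD (2 * i.toNat) 0 + t.getD (2 * i.toNat + 1) 0)) tree1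

-- ===== PORT B =====
-- Port of B's nested 'def f(i)': the mutated tree is threaded as state, f returns (tree, value).
-- The fuel parameter is a totality guard only: it is called with fuel = n, and the recursion
-- depth from the root i = 1 is at most log2(n)+1, so fuel never runs out (n ≤ 2^fuel * i is
-- maintained, and at fuel 0 that makes the fuel-0 branch Python's own 'i >= N' leaf branch).
def buildAuxB (n : Nat) : Nat → Nat → List Int → List Int × Int
  | 0, i, t => (t, t.getD i 0)
  | fuel + 1, i, t =>
    if n ≤ i then (t, t.getD i 0)
    else
      let r1 := buildAuxB n fuel (2 * i) t
      let r2 := buildAuxB n fuel (2 * i + 1) r1.1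
      (r2.1.set i (r1.2 + r2.2), r1.2 + r2.2)

def build_alt (N : Int) (A : List Int) : List Int :=
  if N ≤ 0 then []
  else
    let n := N.toNat
    let tree := (List.range A.length).foldl (fun t i =>
        t.set (i + n) (if i % 2 = 0 then A.getD i 0 else -(A.getD i 0)))
      (List.replicate (2 * n) 0)
    (buildAuxB n n 1 tree).1

-- ===== PRECONDITION & SPEC =====
-- Pre_build is exactly where the Python A returns: the leaf loop writes tree[i+N] for
-- i < len(A), which is in range iff len(A) ≤ N; with A = [] neither loop body runs.
def Pre_build (N : Int) (A : List Int) : Prop := (A.length : Int) ≤ N ∨ A = []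
instance (N : Int) (A : List Int) : Decidable (Pre_build N A) := by unfold Pre_build; infer_instance
def pvWitness_build : Int × List Int := (3, [5, 2, 7])

def Spec_build (N : Int) (A : List Int) (out : List Int) : Prop := out = build_alt N A
instance (N : Int) (A : List Int) (out : List Int) : Decidable (Spec_build N A out) := by unfold Spec_build; infer_instance

-- ===== CLAIM (what is proved, stated in full; the proofs are below) =====
def Claim_equal_build : Prop := ∀ (N : Int) (A : List Int), Dom_build N A → Pre_build N A → Spec_build N A (build N A)

-- ===== LEMMAS AND PROOFS =====

-- the recursive value of node i over a leaf array L (leaves at indices ≥ n), with fuel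
def gval (n : Nat) (L : List Int) : Nat → Nat → Int
  | 0, i => L.getD i 0
  | fuel + 1, i =>
    if n ≤ i then L.getD i 0
    else gval n L fuel (2 * i) + gval n L fuel (2 * i + 1)

theorem gval_leaf (n : Nat) (L : List Int) (f i : Nat) (hn : n ≤ i) :
    gval n L f i = L.getD i 0 := by
  cases f with
  | zero => rfl
  | succ f => rw [gval, if_pos hn]

theorem gval_irrel (n : Nat) (L : List Int) :
    ∀ (f1 f2 i : Nat), 1 ≤ i → n ≤ 2 ^ f1 * i → n ≤ 2 ^ f2 * i →
    gval n L f1 i = gval n L f2 i := by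
  intro f1
  induction f1 with
  | zero =>
    intro f2 i hi h1 h2
    have hn : n ≤ i := by simpa using h1
    rw [gval_leaf n L 0 i hn, gval_leaf n L f2 i hn]
  | succ f1 ih =>
    intro f2 i hi h1 h2
    by_cases hn : n ≤ i
    · rw [gval_leaf n L _ i hn, gval_leaf n L f2 i hn]
    · cases f2 with
      | zero => exact absurd (by simpa using h2) hn
      | succ f2 =>
        rw [gval, gval, if_neg hn, if_neg hn]
        have hb1 : 2 ^ (f1 + 1) * i = 2 ^ f1 * (2 * i) := by ring
        have hb2 : 2 ^ (f2 + 1) * i = 2 ^ f2 * (2 * i) := by ring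
        have hc1 : 2 ^ f1 * (2 * i) ≤ 2 ^ f1 * (2 * i + 1) := by
          exact Nat.mul_le_mul_left _ (by omega)
        have hc2 : 2 ^ f2 * (2 * i) ≤ 2 ^ f2 * (2 * i + 1) := by
          exact Nat.mul_le_mul_left _ (by omega)
        rw [ih f2 (2 * i) (by omega) (by omega) (by omega),
          ih f2 (2 * i + 1) (by omega) (by omega) (by omega)]

theorem gval_node (n : Nat) (L : List Int) (i : Nat) (h0 : 1 ≤ i) (hn : i < n) :
    gval n L n i = gval n L n (2 * i) + gval n L n (2 * i + 1) := by
  cases n with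
  | zero => omega
  | succ m =>
    rw [gval, if_neg (by omega)]
    have hp : m + 1 ≤ 2 ^ m * 2 := by
      have := Nat.lt_two_pow_self (n := m + 1)
      have h2 : 2 ^ (m + 1) = 2 ^ m * 2 := by ring
      omega
    have key : ∀ c : Nat, 2 ≤ c → m + 1 ≤ 2 ^ m * c ∧ m + 1 ≤ 2 ^ (m + 1) * c := by
      intro c hc
      constructor
      · calc m + 1 ≤ 2 ^ m * 2 := hp
          _ ≤ 2 ^ m * c := Nat.mul_le_mul_left _ hc
      · calc m + 1 ≤ 2 ^ m * 2 := hp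
          _ ≤ 2 ^ (m + 1) * c := by
              have : 2 ^ m ≤ 2 ^ (m + 1) := Nat.pow_le_pow_right (by omega) (by omega)
              exact Nat.mul_le_mul this hc
    rw [gval_irrel (m + 1) L m (m + 1) (2 * i) (by omega)
        (key (2 * i) (by omega)).1 (key (2 * i) (by omega)).2,
      gval_irrel (m + 1) L m (m + 1) (2 * i + 1) (by omega)
        (key (2 * i + 1) (by omega)).1 (key (2 * i + 1) (by omega)).2]

-- k lies in the subtree rooted at i (heap indexing)
inductive Desc : Nat → Nat → Prop
  | refl (i : Nat) : Desc i i
  | left {i k : Nat} : Desc (2 * i) k → Desc i k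
  | right {i k : Nat} : Desc (2 * i + 1) k → Desc i k

theorem desc_ge {i k : Nat} (h : Desc i k) : 1 ≤ i → i ≤ k := by
  induction h with
  | refl => omega
  | left _ ih => intro h1; have := ih (by omega); omega
  | right _ ih => intro h1; have := ih (by omega); omega

theorem desc_trans {i j k : Nat} (h1 : Desc i j) (h2 : Desc j k) : Desc i k := by
  induction h1 with
  | refl => exact h2
  | left _ ih => exact Desc.left (ih h2)
  | right _ ih => exact Desc.right (ih h2)

theorem desc_child_left (i : Nat) : Desc i (2 * i) := Desc.left (Desc.refl _)

theorem desc_child_right (i : Nat) : Desc i (2 * i + 1) := Desc.right (Desc.refl _)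

theorem desc_reach (k : Nat) : 1 ≤ k → Desc 1 k := by
  induction k using Nat.strong_induction_on with
  | _ k ih =>
    intro hk
    by_cases h1 : k = 1
    · subst h1; exact Desc.refl 1
    · have hhalf : Desc 1 (k / 2) := ih (k / 2) (by omega) (by omega)
      refine desc_trans hhalf ?_
      rcases Nat.mod_two_eq_zero_or_one k with h2 | h2
      · have hm : k = 2 * (k / 2) := by omega
        have := desc_child_left (k / 2)
        rwa [← hm] at this
      · have hm : k = 2 * (k / 2) + 1 := by omega
        have := desc_child_right (k / 2)
        rwa [← hm] at this

theorem desc_split {i k : Nat} (h : Desc i k) (hne : k ≠ i) :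
    Desc (2 * i) k ∨ Desc (2 * i + 1) k := by
  cases h with
  | refl => exact absurd rfl hne
  | left h => exact Or.inl h
  | right h => exact Or.inr h

theorem getD_set_self (t : List Int) (p : Nat) (v : Int) (h : p < t.length) :
    (t.set p v).getD p 0 = v := by
  simp [List.getD_eq_getElem?_getD, h]

theorem getD_set_ne (t : List Int) (p k : Nat) (v : Int) (h : p ≠ k) :
    (t.set p v).getD k 0 = t.getD k 0 := by
  simp [List.getD_eq_getElem?_getD, List.getElem?_set_ne h]

theorem foldl_length_eq {α : Type} (f : List Int → α → List Int)
    (h : ∀ t x, (f t x).length = t.length) :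
    ∀ (l : List α) (t : List Int), (l.foldl f t).length = t.length := by
  intro l
  induction l with
  | nil => intro t; rfl
  | cons x xs ih => intro t; rw [List.foldl_cons, ih, h]

theorem list_eq_of_getD (t₁ t₂ : List Int) (hlen : t₁.length = t₂.length)
    (h : ∀ k, t₁.getD k 0 = t₂.getD k 0) : t₁ = t₂ := by
  apply List.ext_getElem hlen
  intro k h1 h2
  have := h k
  rwa [List.getD_eq_getElem _ _ h1, List.getD_eq_getElem _ _ h2] at this

theorem buildAuxB_spec (n : Nat) (L : List Int) :
    ∀ (fuel i : Nat) (t : List Int), 1 ≤ i → n ≤ 2 ^ fuel * i → t.length = 2 * n →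
    (∀ k, n ≤ k → t.getD k 0 = L.getD k 0) →
    (buildAuxB n fuel i t).2 = gval n L n i ∧ (buildAuxB n fuel i t).1.length = 2 * n ∧
    (∀ k, k < n → Desc i k → (buildAuxB n fuel i t).1.getD k 0 = gval n L n k) ∧
    (∀ k, ¬ (Desc i k ∧ k < n) → (buildAuxB n fuel i t).1.getD k 0 = t.getD k 0) := by
  intro fuel
  induction fuel with
  | zero =>
    intro i t hi hf ht hleaf
    have hn : n ≤ i := by simpa using hf
    refine ⟨?_, ht, ?_, ?_⟩
    · show t.getD i 0 = gval n L n i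
      rw [gval_leaf n L n i hn]
      exact hleaf i hn
    · intro k hk hd
      exact absurd (desc_ge hd hi) (by omega)
    · intro k _
      rfl
  | succ fuel ih =>
    intro i t hi hf ht hleaf
    rw [buildAuxB]
    by_cases hn : n ≤ i
    · rw [if_pos hn]
      refine ⟨?_, ht, ?_, ?_⟩
      · show t.getD i 0 = gval n L n i
        rw [gval_leaf n L n i hn]
        exact hleaf i hn
      · intro k hk hd
        exact absurd (desc_ge hd hi) (by omega)
      · intro k _
        rfl
    · rw [if_neg hn]
      have hf1 : n ≤ 2 ^ fuel * (2 * i) := by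
        have : 2 ^ (fuel + 1) * i = 2 ^ fuel * (2 * i) := by ring
        omega
      have hf2 : n ≤ 2 ^ fuel * (2 * i + 1) := by
        have : 2 ^ fuel * (2 * i) ≤ 2 ^ fuel * (2 * i + 1) :=
          Nat.mul_le_mul_left _ (by omega)
        omega
      obtain ⟨hv1, hl1, hs1, hk1⟩ := ih (2 * i) t (by omega) hf1 ht hleaf
      have hleaf1 : ∀ k, n ≤ k → (buildAuxB n fuel (2 * i) t).1.getD k 0 = L.getD k 0 := by
        intro k hk
        rw [hk1 k (fun hc => absurd hc.2 (by omega))]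
        exact hleaf k hk
      obtain ⟨hv2, hl2, hs2, hk2⟩ :=
        ih (2 * i + 1) (buildAuxB n fuel (2 * i) t).1 (by omega) hf2 hl1 hleaf1
      refine ⟨?_, ?_, ?_, ?_⟩
      · show (_ + _ : Int) = _
        rw [hv1, hv2, gval_node n L i (by omega) (by omega)]
      · show (List.set _ _ _).length = 2 * n
        rw [List.length_set]
        exact hl2
      · intro k hkn hd
        show (List.set _ _ _).getD k 0 = gval n L n k
        by_cases hk : k = i
        · subst hk
          rw [getD_set_self _ _ _ (by rw [hl2]; omega), hv1, hv2,
            gval_node n L k (by omega) (by omega)]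
        · rw [getD_set_ne _ _ _ _ (fun h => hk h.symm)]
          by_cases hd2 : Desc (2 * i + 1) k
          · exact hs2 k hkn hd2
          · rcases desc_split hd hk with h | h
            · rw [hk2 k (fun hc => hd2 hc.1)]
              exact hs1 k hkn h
            · exact absurd h hd2
      · intro k hnd
        have hki : k ≠ i := by
          intro h
          exact hnd ⟨h ▸ Desc.refl i, by omega⟩
        show (List.set _ _ _).getD k 0 = t.getD k 0
        rw [getD_set_ne _ _ _ _ (fun h => hki h.symm),
          hk2 k (fun hc => hnd ⟨Desc.right hc.1, hc.2⟩),
          hk1 k (fun hc => hnd ⟨Desc.left hc.1, hc.2⟩)]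

-- A's bottom-up loop, folded over range(m, 0, -1)
theorem loopA_spec (n : Nat) (L : List Int) :
    ∀ (m : Nat) (t : List Int), m < n → t.length = 2 * n →
    (∀ k, t.getD k 0 = if m < k ∧ k < n then gval n L n k else L.getD k 0) →
    (∀ k, ((PySem.List.pyRange (m : Int) 0 (-1)).foldl
        (fun t i => t.set i.toNat (t.getD (2 * i.toNat) 0 + t.getD (2 * i.toNat + 1) 0)) t).getD k 0 =
      if 0 < k ∧ k < n then gval n L n k else L.getD k 0) ∧
    ((PySem.List.pyRange (m : Int) 0 (-1)).foldl
        (fun t i => t.set i.toNat (t.getD (2 * i.toNat) 0 + t.getD (2 * i.toNat + 1) 0)) t).length = 2 * n := by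
  intro m
  induction m with
  | zero =>
    intro t hm ht hinv
    rw [PySem.List.pyRange_neg_one_eq_nil (by omega)]
    simp only [List.foldl_nil]
    exact ⟨fun k => hinv k, ht⟩
  | succ m ih =>
    intro t hm ht hinv
    rw [show ((m + 1 : Nat) : Int) = (m : Int) + 1 by push_cast; ring]
    rw [PySem.List.pyRange_neg_one_cons (by omega), List.foldl_cons]
    rw [show ((m : Int) + 1 - 1) = (m : Int) by ring]
    rw [show (((m : Int) + 1)).toNat = m + 1 by omega]
    have hchild : ∀ c, m + 1 < c → t.getD c 0 = gval n L n c := by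
      intro c hc
      rw [hinv c]
      by_cases hcn : c < n
      · rw [if_pos ⟨by omega, hcn⟩]
      · rw [if_neg (by omega), gval_leaf n L n c (by omega)]
    set t' := t.set (m + 1) (t.getD (2 * (m + 1)) 0 + t.getD (2 * (m + 1) + 1) 0) with ht'
    have hlen' : t'.length = 2 * n := by rw [ht', List.length_set, ht]
    have hval : t.getD (2 * (m + 1)) 0 + t.getD (2 * (m + 1) + 1) 0 = gval n L n (m + 1) := by
      rw [hchild _ (by omega), hchild _ (by omega),
        gval_node n L (m + 1) (by omega) (by omega)]
    have hinv' : ∀ k, t'.getD k 0 = if m < k ∧ k < n then gval n L n k else L.getD k 0 := by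
      intro k
      by_cases hk : k = m + 1
      · subst hk
        rw [ht', getD_set_self _ _ _ (by omega), hval, if_pos ⟨by omega, by omega⟩]
      · rw [ht', getD_set_ne _ _ _ _ (fun h => hk h.symm), hinv k]
        by_cases hc : m + 1 < k ∧ k < n
        · rw [if_pos hc, if_pos ⟨by omega, hc.2⟩]
        · rw [if_neg hc]
          by_cases hc2 : m < k ∧ k < n
          · omega
          · rw [if_neg hc2]
    exact ih t' (by omega) hlen' hinv'

-- the two leaf-filling folds are the same function of the same arguments
theorem leaf_fold_eq (N : Int) (A : List Int) (t : List Int) :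
    (List.range A.length).foldl (fun t i =>
        if i % 2 = 0 then t.set (i + N.toNat) (A.getD i 0)
        else t.set (i + N.toNat) (-(A.getD i 0))) t =
    (List.range A.length).foldl (fun t i =>
        t.set (i + N.toNat) (if i % 2 = 0 then A.getD i 0 else -(A.getD i 0))) t := by
  congr 1
  funext t i
  split <;> rfl

theorem build_eq (N : Int) (A : List Int) (hpre : Pre_build N A) :
    build N A = build_alt N A := by
  by_cases hN : N ≤ 0
  · have hA : A = [] := by
      rcases hpre with h | h
      · cases A with
        | nil => rfl
        | cons a as => exfalso; simp at h; omega
      · exact h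
    subst hA
    simp only [build, build_alt, if_pos hN, List.length_nil, List.range_zero, List.foldl_nil]
    rw [PySem.List.pyRange_neg_one_eq_nil (by omega),
      show (2 * N).toNat = 0 by omega, List.replicate_zero, List.foldl_nil]
  · have hlen : (A.length : Int) ≤ N := by
      rcases hpre with h | h
      · exact h
      · subst h
        simp only [List.length_nil, Nat.cast_zero]
        omega
    set n := N.toNat with hn
    have hn1 : 1 ≤ n := by omega
    set L := (List.range A.length).foldl (fun t i =>
        t.set (i + N.toNat) (if i % 2 = 0 then A.getD i 0 else -(A.getD i 0)))
      (List.replicate (2 * n) 0) with hL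
    have hLlen : L.length = 2 * n := by
      rw [hL, foldl_length_eq]
      · simp
      · intro t x; simp
    have hA1 : build N A = (PySem.List.pyRange ((n - 1 : Nat) : Int) 0 (-1)).foldl
        (fun t i => t.set i.toNat (t.getD (2 * i.toNat) 0 + t.getD (2 * i.toNat + 1) 0)) L := by
      simp only [build]
      rw [leaf_fold_eq, hL]
      rw [show (2 * N).toNat = 2 * n by omega]
      rw [show N - 1 = ((n - 1 : Nat) : Int) by omega]
    have hAspec := loopA_spec n L (n - 1) L (by omega) hLlen (by
      intro k
      rw [if_neg (by omega)])
    have hBspec := buildAuxB_spec n L n 1 L (by omega) (by have := Nat.lt_two_pow_self (n := n); omega) hLlen (fun k _ => rfl)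
    have hB1 : build_alt N A = (buildAuxB n n 1 L).1 := by
      simp only [build_alt, if_neg hN, hL, hn]
    rw [hA1, hB1]
    obtain ⟨_, hBlen, hBset, hBkeep⟩ := hBspec
    apply list_eq_of_getD
    · rw [hAspec.2, hBlen]
    · intro k
      rw [hAspec.1 k]
      by_cases hk : 0 < k ∧ k < n
      · rw [if_pos hk, hBset k hk.2 (desc_reach k hk.1)]
      · rw [if_neg hk]
        rw [hBkeep k (fun hc => hk ⟨by have := desc_ge hc.1 (by omega); omega, hc.2⟩)]

-- ===== VERDICT (by name: the statement is the Claim_ definition above) =====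
theorem build_spec : Claim_equal_build := by
  intro N A _ hpre
  unfold Spec_build
  exact build_eq N A hpre
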